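-- pv_equiv track=rewrite | github.com/cosmoparadox/mathematical-tools | livelock_final.py | bpow
-- ===== SOURCE A (Python) =====
-- def bmm(A, B):
--     n = len(A)
--     C = [[0]*n for _ in range(n)]
--     for i in range(n):
--         for k in range(n):
--             if A[i][k]:
--                 for j in range(n):
--                     if B[k][j]: C[i][j] = 1
--     return C
--
-- def bpow(M, p):
--     n = len(M)
--     R = [[1 if i==j else 0 for j in range(n)] for i in range(n)]
--     B = [row[:] for row in M]
--     while p:
--         if p & 1: R = bmm(R, B)
--         B = bmm(B, B)
--         p >>= 1
--     return R
-- ===== SOURCE B (Python) =====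
-- def bpow(M, p):
--     # Bitmask rows: each row becomes an int; the inner j-loop of bmm becomes a single bitwise OR.
--     n = len(M)
--
--     def mask(row):
--         m = 0
--         for j, v in enumerate(row[:n]):
--             if v:
--                 m |= 1 << j
--         return m
--
--     def mul(X, Y):
--         out = []
--         for x in X:
--             m = 0
--             for k in range(n):
--                 if (x >> k) & 1:
--                     m |= Y[k]
--             out.append(m)
--         return out
--
--     B = [mask(r) for r in M]
--     R = [1 << i for i in range(n)]
--     while p:
--         if p & 1:
--             R = mul(R, B)
--         B = mul(B, B)
--         p >>= 1
--     return [[(m >> j) & 1 for j in range(n)] for m in R]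
-- ===== Notes on version B (the rewrite author's own statement) =====
-- stated objective: faster
-- what changed: Each matrix row is packed into an integer bitmask, so bmm's innermost j-loop over columns is replaced by a single bitwise OR of whole rows (C-row = OR of B's mask-rows over the set bits of the left row); the squaring loop itself is unchanged in shape but operates on lists of ints instead of lists of lists.
import Mathlib
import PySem

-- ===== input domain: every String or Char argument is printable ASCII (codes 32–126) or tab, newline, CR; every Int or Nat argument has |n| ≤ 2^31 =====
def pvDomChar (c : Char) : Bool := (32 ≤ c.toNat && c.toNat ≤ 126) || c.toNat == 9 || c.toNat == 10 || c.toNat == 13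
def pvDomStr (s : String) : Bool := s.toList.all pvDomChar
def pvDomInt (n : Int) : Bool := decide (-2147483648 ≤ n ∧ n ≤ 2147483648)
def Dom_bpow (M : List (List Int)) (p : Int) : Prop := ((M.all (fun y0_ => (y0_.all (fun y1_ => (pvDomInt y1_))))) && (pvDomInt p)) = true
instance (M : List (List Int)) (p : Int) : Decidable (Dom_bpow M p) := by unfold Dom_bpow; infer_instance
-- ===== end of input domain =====

-- B replaces bmm's three nested loops by per-row integer bitmasks: a result row is the
-- bitwise OR of the right matrix's mask-rows over the set bits of the left row, so the
-- innermost j-loop disappears into one OR per selected row.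

-- ===== PORT A =====
-- inner 'for j in range(n): if B[k][j]: C[i][j] = 1'
def bmmInner (n : Nat) (Brow : List Int) (Ci : List Int) : List Int :=
  (List.range n).foldl (fun Ci' j => if Brow.getD j 0 ≠ 0 then Ci'.set j 1 else Ci') Ci

-- the k-loop producing row i of C (row i depends only on A's row i); indexing is in range
-- on Pre_ inputs, so A[i][k] / B[k][j] are transliterated with getD
def bmmRow (n : Nat) (B : List (List Int)) (a : List Int) : List Int :=
  (List.range n).foldl
    (fun Ci k => if a.getD k 0 ≠ 0 then bmmInner n (B.getD k []) Ci else Ci)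
    (List.replicate n 0)

def bmm (A B : List (List Int)) : List (List Int) :=
  A.map (bmmRow A.length B)

-- 'while p:' with p & 1 = p % 2, p >>= 1 = p / 2 on the nonnegative p admitted by Pre_
def bpowLoop (p : Nat) (R B : List (List Int)) : List (List Int) :=
  if p = 0 then R
  else bpowLoop (p / 2) (if p % 2 = 1 then bmm R B else R) (bmm B B)
termination_by p
decreasing_by omega

def bpow (M : List (List Int)) (p : Int) : List (List Int) :=
  let n := M.length
  let R := (List.range n).map (fun i => (List.range n).map (fun j => if i = j then (1 : Int) else 0))
  let B := M.map (fun row => row)   -- row[:] copies; the copy of an immutable value is itself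
  bpowLoop p.toNat R B

-- ===== PORT B =====
-- mask(row): bit j of the mask is set iff row[:n][j] is truthy
def rowMask (n : Nat) (r : List Int) : Nat :=
  (r.take n).zipIdx.foldl (fun (m : Nat) (jv : Int × Nat) => if jv.1 ≠ 0 then m ||| (1 <<< jv.2) else m) 0

-- one row of mul: OR together Y[k] over the set bits k of x
def bmulRow (n : Nat) (Y : List Nat) (x : Nat) : Nat :=
  (List.range n).foldl (fun m k => if (x >>> k) &&& 1 ≠ 0 then m ||| Y.getD k 0 else m) 0

def bmul (n : Nat) (X Y : List Nat) : List Nat :=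
  X.map (bmulRow n Y)

def bpowLoopB (n : Nat) (p : Nat) (R B : List Nat) : List Nat :=
  if p = 0 then R
  else bpowLoopB n (p / 2) (if p % 2 = 1 then bmul n R B else R) (bmul n B B)
termination_by p
decreasing_by omega

-- final [[(m >> j) & 1 for j in range(n)] for m in R]
def unmaskRow (n : Nat) (m : Nat) : List Int :=
  (List.range n).map (fun j => (((m >>> j) &&& 1 : Nat) : Int))

def bpow_alt (M : List (List Int)) (p : Int) : List (List Int) :=
  let n := M.length
  let B := M.map (rowMask n)
  let R := (List.range n).map (fun i => 1 <<< i)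
  (bpowLoopB n p.toNat R B).map (unmaskRow n)

-- ===== PRECONDITION & SPEC =====
-- Pre_ excludes exactly the inputs where the Python A does not return: p < 0 (p >>= 1 never
-- reaches 0, so the while loop never ends) and, when the loop runs at all (p ≠ 0), a row
-- shorter than len(M) (IndexError in bmm).
def Pre_bpow (M : List (List Int)) (p : Int) : Prop :=
  0 ≤ p ∧ (p = 0 ∨ ∀ r ∈ M, M.length ≤ r.length)
instance (M : List (List Int)) (p : Int) : Decidable (Pre_bpow M p) := by
  unfold Pre_bpow; infer_instance

def pvWitness_bpow : List (List Int) × Int := ([[1, 0], [1, 1]], 3)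

def Spec_bpow (M : List (List Int)) (p : Int) (out : List (List Int)) : Prop := out = bpow_alt M p
instance (M : List (List Int)) (p : Int) (out : List (List Int)) : Decidable (Spec_bpow M p out) := by unfold Spec_bpow; infer_instance

-- ===== CLAIM (what is proved, stated in full; the proofs are below) =====
def Claim_equal_bpow : Prop := ∀ (M : List (List Int)) (p : Int), Dom_bpow M p → Pre_bpow M p → Spec_bpow M p (bpow M p)

-- ===== LEMMAS AND PROOFS =====

theorem shiftRight_and_one (m j : Nat) : (m >>> j) &&& 1 = if m.testBit j then 1 else 0 := by
  rw [Nat.and_one_is_mod]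
  rcases Nat.mod_two_eq_zero_or_one (m >>> j) with h | h <;> simp [Nat.testBit, h]

theorem testBit_false_of_lt {x n : Nat} (h : x < 2 ^ n) {j : Nat} (hj : n ≤ j) :
    x.testBit j = false :=
  Nat.testBit_lt_two_pow (lt_of_lt_of_le h (Nat.pow_le_pow_right (by omega) hj))

theorem unmaskRow_length (n m : Nat) : (unmaskRow n m).length = n := by
  simp [unmaskRow]

theorem unmaskRow_getD (n m j : Nat) :
    (unmaskRow n m).getD j 0 = if j < n ∧ m.testBit j then 1 else 0 := by
  unfold unmaskRow
  rw [List.getD, List.getElem?_map]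
  by_cases hj : j < n
  · rw [List.getElem?_range hj]
    simp only [Option.map_some, Option.getD_some, shiftRight_and_one, hj, true_and]
    split <;> simp_all
  · rw [List.getElem?_eq_none (by simpa using le_of_not_gt hj)]
    simp [hj]

theorem rowMask_fold_testBit (l : List (Int × Nat)) (m0 : Nat) (j : Nat) :
    ((l.foldl (fun (m : Nat) (jv : Int × Nat) => if jv.1 ≠ 0 then m ||| (1 <<< jv.2) else m) m0).testBit j) =
      (m0.testBit j || l.any (fun jv => decide (jv.1 ≠ 0) && (jv.2 == j))) := by
  induction l generalizing m0 with
  | nil => simp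
  | cons a l ih =>
    simp only [List.foldl_cons, List.any_cons, ih]
    by_cases ha : a.1 ≠ 0
    · rw [if_pos ha]
      simp only [Nat.testBit_or, Nat.shiftLeft_eq, one_mul, Nat.testBit_two_pow,
        decide_eq_true ha, Bool.true_and]
      by_cases hj2 : a.2 = j <;> simp [hj2, Bool.or_comm, Bool.or_left_comm]
    · rw [if_neg ha]
      simp only [not_not] at ha
      simp [ha]

theorem rowMask_testBit (n : Nat) (r : List Int) (j : Nat) :
    (rowMask n r).testBit j = (decide (j < n) && decide (r.getD j 0 ≠ 0)) := by
  unfold rowMask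
  rw [rowMask_fold_testBit]
  simp only [Nat.zero_testBit, Bool.false_or]
  by_cases hj : j < n ∧ r.getD j 0 ≠ 0
  · obtain ⟨h1, h2⟩ := hj
    have hjr : j < r.length := by
      by_contra h
      rw [List.getD, List.getElem?_eq_none (by omega)] at h2; simp at h2
    have hval : r.getD j 0 = r[j] := by
      rw [List.getD, List.getElem?_eq_getElem hjr]; rfl
    have hmem : (r[j], j) ∈ (r.take n).zipIdx := by
      rw [List.mk_mem_zipIdx_iff_getElem?, List.getElem?_take]
      simp [h1, List.getElem?_eq_getElem hjr]
    simp only [decide_eq_true h1, decide_eq_true h2, Bool.and_self]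
    rw [List.any_eq_true]
    refine ⟨(r[j], j), hmem, ?_⟩
    simp only [beq_self_eq_true, Bool.and_true]
    rw [hval] at h2
    simpa using h2
  · have hfalse : ((r.take n).zipIdx.any fun jv => decide (jv.1 ≠ 0) && (jv.2 == j)) = false := by
      rw [List.any_eq_false]
      rintro ⟨v, i⟩ hmem hcond
      simp only [Bool.and_eq_true, decide_eq_true_iff, beq_iff_eq] at hcond
      obtain ⟨hv, hij⟩ := hcond
      subst hij
      rw [List.mk_mem_zipIdx_iff_getElem?, List.getElem?_take] at hmem
      by_cases hjn : i < n
      · rw [if_pos hjn] at hmem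
        exact hj ⟨hjn, by rw [List.getD, hmem]; simpa using hv⟩
      · rw [if_neg hjn] at hmem; cases hmem
    rw [hfalse]
    rcases not_and_or.mp hj with h | h
    · simp [h]
    · simp only [not_not] at h
      simp only [List.getD] at h
      simp [h]

theorem rowMask_fold_lt (n : Nat) (l : List (Int × Nat)) (hl : ∀ jv ∈ l, jv.2 < n) :
    ∀ m0 : Nat, m0 < 2 ^ n →
      (l.foldl (fun (m : Nat) (jv : Int × Nat) => if jv.1 ≠ 0 then m ||| (1 <<< jv.2) else m) m0) < 2 ^ n := by
  induction l with
  | nil => intro m0 h; simpa using h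
  | cons a l ih =>
    intro m0 h
    simp only [List.foldl_cons]
    refine ih (fun jv hjv => hl jv (List.mem_cons_of_mem _ hjv)) _ ?_
    by_cases ha : a.1 ≠ 0
    · rw [if_pos ha]
      refine Nat.or_lt_two_pow h ?_
      rw [Nat.shiftLeft_eq, one_mul]
      exact Nat.pow_lt_pow_right (by omega) (hl a (List.mem_cons_self))
    · rw [if_neg ha]; exact h

theorem rowMask_lt (n : Nat) (r : List Int) : rowMask n r < 2 ^ n := by
  unfold rowMask
  refine rowMask_fold_lt n _ ?_ 0 (Nat.two_pow_pos n)
  intro jv hjv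
  have := List.mem_zipIdx hjv
  have hlen : (r.take n).length ≤ n := by simp
  omega

theorem rowMask_unmask (n m : Nat) (hm : m < 2 ^ n) : rowMask n (unmaskRow n m) = m := by
  apply Nat.eq_of_testBit_eq
  intro j
  rw [rowMask_testBit, unmaskRow_getD]
  by_cases hj : j < n
  · by_cases hb : m.testBit j
    · simp [hj, hb]
    · simp [hj, hb]
  · rw [testBit_false_of_lt hm (by omega)]
    simp [hj]

theorem bmulRow_fold_testBit (Y : List Nat) (x : Nat) (l : List Nat) (m0 : Nat) (j : Nat) :
    ((l.foldl (fun m k => if (x >>> k) &&& 1 ≠ 0 then m ||| Y.getD k 0 else m) m0).testBit j) =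
      (m0.testBit j || l.any (fun k => x.testBit k && (Y.getD k 0).testBit j)) := by
  induction l generalizing m0 with
  | nil => simp
  | cons a l ih =>
    simp only [List.foldl_cons, List.any_cons, ih]
    rw [shiftRight_and_one]
    by_cases hx : x.testBit a
    · rw [if_pos (by simp [hx])]
      simp [hx, Nat.testBit_or, Bool.or_assoc]
    · rw [if_neg (by simp [hx])]
      simp [hx]

theorem bmulRow_testBit (n : Nat) (Y : List Nat) (x : Nat) (j : Nat) :
    (bmulRow n Y x).testBit j =
      ((List.range n).any (fun k => x.testBit k && (Y.getD k 0).testBit j)) := by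
  unfold bmulRow
  rw [bmulRow_fold_testBit]
  simp

theorem bmulRow_lt (n : Nat) (Y : List Nat) (x : Nat) (hY : ∀ y ∈ Y, y < 2 ^ n) :
    bmulRow n Y x < 2 ^ n := by
  unfold bmulRow
  have hgen : ∀ (l : List Nat) (m0 : Nat), m0 < 2 ^ n →
      (l.foldl (fun m k => if (x >>> k) &&& 1 ≠ 0 then m ||| Y.getD k 0 else m) m0) < 2 ^ n := by
    intro l
    induction l with
    | nil => intro m0 h; simpa using h
    | cons a l ih =>
      intro m0 h
      simp only [List.foldl_cons]
      refine ih _ ?_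
      split
      · refine Nat.or_lt_two_pow h ?_
        rcases Nat.lt_or_ge a Y.length with ha | ha
        · have : Y.getD a 0 = Y[a] := by rw [List.getD, List.getElem?_eq_getElem ha]; rfl
          rw [this]
          exact hY _ (List.getElem_mem ha)
        · rw [List.getD, List.getElem?_eq_none (by omega)]
          exact Nat.two_pow_pos n
      · exact h
  exact hgen _ 0 (Nat.two_pow_pos n)

theorem inner_fold_length (Brow : List Int) (l : List Nat) : ∀ (Ci : List Int),
    (l.foldl (fun Ci' j' => if Brow.getD j' 0 ≠ 0 then Ci'.set j' 1 else Ci') Ci).length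
      = Ci.length := by
  induction l with
  | nil => intro Ci; rfl
  | cons a l ih =>
    intro Ci
    simp only [List.foldl_cons, ih]
    split <;> simp

theorem getD_set (Ci : List Int) (a j : Nat) (v : Int) :
    (Ci.set a v).getD j 0 = if a = j ∧ a < Ci.length then v else Ci.getD j 0 := by
  rw [List.getD, List.getElem?_set]
  by_cases h1 : a = j
  · subst h1
    by_cases h2 : a < Ci.length
    · simp [h2]
    · rw [if_pos rfl, if_neg h2, if_neg (by tauto)]
      rw [List.getD, List.getElem?_eq_none (by omega)]
  · rw [if_neg h1, if_neg (by tauto)]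
    rfl

theorem inner_fold_getD (Brow : List Int) (l : List Nat) : ∀ (Ci : List Int) (j : Nat),
    ((l.foldl (fun Ci' j' => if Brow.getD j' 0 ≠ 0 then Ci'.set j' 1 else Ci') Ci).getD j 0)
      = if j ∈ l ∧ Brow.getD j 0 ≠ 0 ∧ j < Ci.length then 1 else Ci.getD j 0 := by
  induction l with
  | nil => intro Ci j; simp
  | cons a l ih =>
    intro Ci j
    simp only [List.foldl_cons, ih, List.mem_cons]
    by_cases hja : j = a
    · subst hja
      by_cases ha : Brow.getD j 0 ≠ 0
      · rw [if_pos ha]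
        simp only [List.length_set]
        rw [getD_set]
        split_ifs <;> first | rfl | tauto
      · rw [if_neg ha]
        split_ifs <;> first | rfl | tauto
    · by_cases ha : Brow.getD a 0 ≠ 0
      · rw [if_pos ha]
        simp only [List.length_set]
        rw [getD_set]
        split_ifs <;> first | rfl | tauto
      · rw [if_neg ha]
        split_ifs <;> first | rfl | tauto

theorem bmmInner_length (n : Nat) (Brow Ci : List Int) :
    (bmmInner n Brow Ci).length = Ci.length := inner_fold_length _ _ _

theorem bmmInner_getD (n : Nat) (Brow Ci : List Int) (j : Nat) :
    (bmmInner n Brow Ci).getD j 0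
      = if j < n ∧ Brow.getD j 0 ≠ 0 ∧ j < Ci.length then 1 else Ci.getD j 0 := by
  rw [bmmInner, inner_fold_getD]
  simp [List.mem_range]

theorem outer_fold_length (n : Nat) (B : List (List Int)) (a : List Int) (l : List Nat) :
    ∀ (Ci : List Int),
    (l.foldl (fun Ci k => if a.getD k 0 ≠ 0 then bmmInner n (B.getD k []) Ci else Ci) Ci).length
      = Ci.length := by
  induction l with
  | nil => intro Ci; rfl
  | cons c l ih =>
    intro Ci
    simp only [List.foldl_cons, ih]
    split
    · exact bmmInner_length _ _ _
    · rfl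

theorem outer_fold_getD (n : Nat) (B : List (List Int)) (a : List Int) (l : List Nat) :
    ∀ (Ci : List Int) (j : Nat), Ci.length = n →
    ((l.foldl (fun Ci k => if a.getD k 0 ≠ 0 then bmmInner n (B.getD k []) Ci else Ci) Ci).getD j 0)
      = if (∃ k ∈ l, a.getD k 0 ≠ 0 ∧ (B.getD k []).getD j 0 ≠ 0) ∧ j < n then 1
        else Ci.getD j 0 := by
  induction l with
  | nil => intro Ci j h; simp
  | cons c l ih =>
    intro Ci j hCi
    simp only [List.foldl_cons]
    by_cases hc : a.getD c 0 ≠ 0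
    · rw [if_pos hc, ih _ _ (by rw [bmmInner_length, hCi]), bmmInner_getD, hCi]
      by_cases hex : (∃ k ∈ l, a.getD k 0 ≠ 0 ∧ (B.getD k []).getD j 0 ≠ 0) ∧ j < n
      · rw [if_pos hex, if_pos ⟨⟨hex.1.choose, List.mem_cons_of_mem _ hex.1.choose_spec.1,
          hex.1.choose_spec.2⟩, hex.2⟩]
      · rw [if_neg hex]
        by_cases hcj : j < n ∧ (B.getD c []).getD j 0 ≠ 0
        · rw [if_pos ⟨hcj.1, hcj.2, hcj.1⟩,
            if_pos ⟨⟨c, List.mem_cons_self, hc, hcj.2⟩, hcj.1⟩]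
        · rw [if_neg (by tauto), if_neg ?_]
          rintro ⟨⟨k, hk, h1, h2⟩, hjn⟩
          rcases List.mem_cons.mp hk with hk' | hk'
          · exact hcj ⟨hjn, hk' ▸ h2⟩
          · exact hex ⟨⟨k, hk', h1, h2⟩, hjn⟩
    · rw [if_neg hc, ih _ _ hCi]
      by_cases hex : (∃ k ∈ l, a.getD k 0 ≠ 0 ∧ (B.getD k []).getD j 0 ≠ 0) ∧ j < n
      · rw [if_pos hex, if_pos ⟨⟨hex.1.choose, List.mem_cons_of_mem _ hex.1.choose_spec.1,
          hex.1.choose_spec.2⟩, hex.2⟩]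
      · rw [if_neg hex, if_neg ?_]
        rintro ⟨⟨k, hk, h1, h2⟩, hjn⟩
        rcases List.mem_cons.mp hk with hk' | hk'
        · exact hc (hk' ▸ h1)
        · exact hex ⟨⟨k, hk', h1, h2⟩, hjn⟩

theorem bmmRow_length (n : Nat) (B : List (List Int)) (a : List Int) :
    (bmmRow n B a).length = n := by
  rw [bmmRow, outer_fold_length]; simp

theorem bmmRow_getD (n : Nat) (B : List (List Int)) (a : List Int) (j : Nat) :
    (bmmRow n B a).getD j 0
      = if j < n ∧ ∃ k < n, a.getD k 0 ≠ 0 ∧ (B.getD k []).getD j 0 ≠ 0 then 1 else 0 := by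
  rw [bmmRow, outer_fold_getD n B a _ _ j (by simp)]
  have hrep : (List.replicate n (0 : Int)).getD j 0 = 0 := by
    rcases Nat.lt_or_ge j n with h | h <;> simp [List.getD, h]
  rw [hrep]
  by_cases h1 : j < n ∧ ∃ k < n, a.getD k 0 ≠ 0 ∧ (B.getD k []).getD j 0 ≠ 0
  · rw [if_pos h1]
    obtain ⟨hj, k, hk, h2, h3⟩ := h1
    rw [if_pos ⟨⟨k, List.mem_range.mpr hk, h2, h3⟩, hj⟩]
  · rw [if_neg h1, if_neg ?_]
    rintro ⟨⟨k, hk, h2, h3⟩, hj⟩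
    exact h1 ⟨hj, k, List.mem_range.mp hk, h2, h3⟩

theorem list_eq_of_getD (l1 l2 : List Int) (h1 : l1.length = l2.length)
    (h : ∀ j, j < l1.length → l1.getD j 0 = l2.getD j 0) : l1 = l2 := by
  apply List.ext_getElem h1
  intro j hj1 hj2
  have := h j hj1
  rwa [List.getD, List.getD, List.getElem?_eq_getElem hj1, List.getElem?_eq_getElem hj2] at this

-- the heart of the equivalence: one bmm row equals the unmasked bmul row
theorem step (n : Nat) (B : List (List Int)) (hB : B.length = n) (a : List Int) (x : Nat)
    (hx : ∀ k, x.testBit k = (decide (k < n) && decide (a.getD k 0 ≠ 0))) :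
    bmmRow n B a = unmaskRow n (bmulRow n (B.map (rowMask n)) x) := by
  apply list_eq_of_getD
  · rw [bmmRow_length, unmaskRow_length]
  · intro j hj
    rw [bmmRow_length] at hj
    rw [bmmRow_getD, unmaskRow_getD, bmulRow_testBit]
    have key : ((List.range n).any (fun k => x.testBit k && ((B.map (rowMask n)).getD k 0).testBit j)) = true
        ↔ ∃ k < n, a.getD k 0 ≠ 0 ∧ (B.getD k []).getD j 0 ≠ 0 := by
      rw [List.any_eq_true]
      constructor
      · rintro ⟨k, hkmem, hcond⟩
        have hk := List.mem_range.mp hkmem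
        have hkB : k < B.length := by omega
        have hBm : (B.map (rowMask n)).getD k 0 = rowMask n B[k] := by
          rw [List.getD, List.getElem?_map, List.getElem?_eq_getElem hkB]; rfl
        have hBk : B.getD k [] = B[k] := by
          rw [List.getD, List.getElem?_eq_getElem hkB]; rfl
        rw [hx, hBm, rowMask_testBit] at hcond
        simp only [Bool.and_eq_true, decide_eq_true_iff] at hcond
        exact ⟨k, hk, hcond.1.2, by rw [hBk]; exact hcond.2.2⟩
      · rintro ⟨k, hk, h1, h2⟩
        refine ⟨k, List.mem_range.mpr hk, ?_⟩
        have hkB : k < B.length := by omega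
        have hBm : (B.map (rowMask n)).getD k 0 = rowMask n B[k] := by
          rw [List.getD, List.getElem?_map, List.getElem?_eq_getElem hkB]; rfl
        have hBk : B.getD k [] = B[k] := by
          rw [List.getD, List.getElem?_eq_getElem hkB]; rfl
        rw [hx, hBm, rowMask_testBit]
        rw [hBk] at h2
        simp only [List.getD] at h1 h2
        simp [hk, hj, h1, h2]
    by_cases hc : ∃ k < n, a.getD k 0 ≠ 0 ∧ (B.getD k []).getD j 0 ≠ 0
    · rw [if_pos ⟨hj, hc⟩, if_pos ⟨hj, key.mpr hc⟩]
    · rw [if_neg (fun h => hc h.2), if_neg ?_]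
      rintro ⟨-, hbit⟩
      exact hc (key.mp hbit)

theorem loopEq (n : Nat) : ∀ (p : Nat) (BA : List (List Int)) (Rm Bm : List Nat),
    BA.length = n → Rm.length = n → (∀ m ∈ Rm, m < 2 ^ n) → Bm = BA.map (rowMask n) →
    bpowLoop p (Rm.map (unmaskRow n)) BA = (bpowLoopB n p Rm Bm).map (unmaskRow n) := by
  intro p
  induction p using Nat.strong_induction_on with
  | _ p ih =>
    intro BA Rm Bm hBA hRm hRlt hBm
    by_cases hp : p = 0
    · subst hp
      rw [bpowLoop, bpowLoopB]
      simp
    · rw [bpowLoop, bpowLoopB, if_neg hp, if_neg hp]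
      have hBmLt : ∀ y ∈ Bm, y < 2 ^ n := by
        intro y hy
        rw [hBm] at hy
        obtain ⟨r, -, rfl⟩ := List.mem_map.mp hy
        exact rowMask_lt n r
      have hR' : (if p % 2 = 1 then bmm (Rm.map (unmaskRow n)) BA else Rm.map (unmaskRow n))
          = (if p % 2 = 1 then bmul n Rm Bm else Rm).map (unmaskRow n) := by
        by_cases hodd : p % 2 = 1
        · rw [if_pos hodd, if_pos hodd]
          rw [bmm, List.length_map, hRm, List.map_map, bmul, List.map_map]
          apply List.map_congr_left
          intro m hm
          have hmlt := hRlt m hm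
          rw [Function.comp_apply, Function.comp_apply]
          rw [step n BA hBA (unmaskRow n m) m ?_, hBm]
          intro k
          rw [unmaskRow_getD]
          by_cases hk : k < n
          · by_cases hb : m.testBit k
            · simp [hk, hb]
            · simp [hk, hb]
          · rw [testBit_false_of_lt hmlt (by omega)]
            simp [hk]
        · rw [if_neg hodd, if_neg hodd]
      have hB' : bmul n Bm Bm = (bmm BA BA).map (rowMask n) := by
        rw [bmm, hBA, List.map_map, bmul, hBm, List.map_map]
        apply List.map_congr_left
        intro a _
        rw [Function.comp_apply, Function.comp_apply]
        rw [← hBm, step n BA hBA a (rowMask n a) (fun k => rowMask_testBit n a k), hBm]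
        rw [rowMask_unmask _ _ (bmulRow_lt n _ _ (by rw [← hBm]; exact hBmLt))]
      rw [hR']
      refine ih (p / 2) (by omega) (bmm BA BA) _ (bmul n Bm Bm) ?_ ?_ ?_ hB'
      · rw [bmm, List.length_map, hBA]
      · by_cases hodd : p % 2 = 1 <;> simp [hodd, bmul, hRm]
      · intro m hm
        by_cases hodd : p % 2 = 1
        · rw [if_pos hodd, bmul] at hm
          obtain ⟨x, -, rfl⟩ := List.mem_map.mp hm
          exact bmulRow_lt n Bm x hBmLt
        · rw [if_neg hodd] at hm
          exact hRlt m hm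

-- ===== VERDICT (by name: the statement is the Claim_ definition above) =====
theorem bpow_spec : Claim_equal_bpow := by
  intro M p _ _
  unfold Spec_bpow bpow bpow_alt
  dsimp only
  have hid : ((List.range M.length).map
        (fun i => (List.range M.length).map (fun j => if i = j then (1 : Int) else 0)))
      = ((List.range M.length).map (fun i => 1 <<< i)).map (unmaskRow M.length) := by
    rw [List.map_map]
    apply List.map_congr_left
    intro i hi
    rw [Function.comp_apply]
    unfold unmaskRow
    apply List.map_congr_left
    intro j hj
    rw [shiftRight_and_one, Nat.shiftLeft_eq, one_mul, Nat.testBit_two_pow]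
    by_cases hij : i = j <;> simp [hij]
  have hcopy : M.map (fun row => row) = M := by
    simp
  rw [hid, hcopy]
  apply loopEq M.length p.toNat M _ _ rfl (by simp) ?_ rfl
  intro m hm
  obtain ⟨i, hi, rfl⟩ := List.mem_map.mp hm
  rw [Nat.shiftLeft_eq, one_mul]
  exact Nat.pow_lt_pow_right (by omega) (List.mem_range.mp hi)
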